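-- pv_equiv track=rewrite | github.com/MichaelJamesFinnerty/pymkdir | in_it_ex.py | determine_next_spec_char
-- ===== SOURCE A (Python) =====
-- def determine_next_spec_char(string):
--     #   returns an integer representing the location of the next
--     #   special character
--     spec_char = ['+', '*' , '.']
--
--     #   set the current result as the length of the string
--     #
--     #   if no special character is found, the entire string will
--     #   be returned
--     loc_out = len(string)
--
--     #   any special characters that are found wll be set as the
--     #   cut-off location (if they occur earlier than the
--     #   current cur-off location)
--     for char in spec_char:
--         if char in string:
--             loc_cur = string.find(char)
--             if loc_cur < loc_out: loc_out = loc_cur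
--
--     return loc_out
-- ===== SOURCE B (Python) =====
-- def determine_next_spec_char(string):
--     # single left-to-right pass: return the index of the first special
--     # character; if none occurs, return len(string)
--     for i, ch in enumerate(string):
--         if ch in "+*.":
--             return i
--     return len(string)
-- ===== Notes on version B (the rewrite author's own statement) =====
-- stated objective: simpler
-- what changed: B replaces A's per-special-character scans (one 'in' test plus one find per special char, then a running minimum) with a single left-to-right pass over the string that returns the first index holding a special character.
import Mathlib
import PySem

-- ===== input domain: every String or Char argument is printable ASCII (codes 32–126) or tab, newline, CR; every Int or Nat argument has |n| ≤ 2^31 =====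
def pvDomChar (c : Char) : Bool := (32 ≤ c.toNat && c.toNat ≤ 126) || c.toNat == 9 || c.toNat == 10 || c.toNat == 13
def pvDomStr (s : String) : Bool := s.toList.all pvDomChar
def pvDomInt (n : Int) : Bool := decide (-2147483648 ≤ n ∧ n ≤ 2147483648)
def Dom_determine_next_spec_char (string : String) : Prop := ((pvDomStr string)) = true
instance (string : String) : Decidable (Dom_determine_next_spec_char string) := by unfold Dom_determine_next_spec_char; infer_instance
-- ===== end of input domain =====

-- B replaces A's per-special-character scans with a single left-to-right pass
-- returning the first index holding a special character (objective: simpler).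


-- ===== PORT A =====
def determine_next_spec_char (string : String) : Int :=
  let spec_char : List String := ["+", "*", "."]
  let loc_out : Int := PySem.Str.len string
  spec_char.foldl
    (fun loc_out char =>
      if PySem.Str.isIn char string then
        let loc_cur := PySem.Str.find string char
        if loc_cur < loc_out then loc_cur else loc_out
      else loc_out)
    loc_out

-- ===== PORT B =====
-- the for-loop over enumerate(string) with early return; 'ch in "+*."' is the
-- Python substring test on the single-character string [ch]
def pvAltLoop (string : String) : List (Int × Char) → Int
  | [] => PySem.Str.len string
  | (i, ch) :: rest =>
      if PySem.Chars.isIn [ch] ['+', '*', '.'] then i else pvAltLoop string rest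

def determine_next_spec_char_alt (string : String) : Int :=
  pvAltLoop string (PySem.List.enumerate string.toList)

-- ===== PRECONDITION & SPEC =====
def Spec_determine_next_spec_char (string : String) (out : Int) : Prop := out = determine_next_spec_char_alt string
instance (string : String) (out : Int) : Decidable (Spec_determine_next_spec_char string out) := by unfold Spec_determine_next_spec_char; infer_instance

-- ===== CLAIM (what is proved, stated in full; the proofs are below) =====
def Claim_equal_determine_next_spec_char : Prop := ∀ (string : String), Dom_determine_next_spec_char string → Spec_determine_next_spec_char string (determine_next_spec_char string)

-- ===== LEMMAS AND PROOFS =====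

-- the character predicate both programs are about
def pvIsSpec (c : Char) : Bool := c == '+' || c == '*' || c == '.'

lemma pv_isIn_singleton (c : Char) (s : List Char) :
    PySem.Chars.isIn [c] s = true ↔ c ∈ s := by
  rw [PySem.Chars.isIn_iff_infix, List.singleton_infix_iff]

lemma pv_isIn_spec (c : Char) :
    PySem.Chars.isIn [c] ['+', '*', '.'] = pvIsSpec c := by
  rw [Bool.eq_iff_iff, pv_isIn_singleton]
  simp [pvIsSpec, or_assoc]

lemma pv_singleton_prefix_drop (c : Char) (l : List Char) (n : Nat) :
    [c] <+: l.drop n ↔ l[n]? = some c := by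
  rw [← List.head?_drop]
  constructor
  · rintro ⟨t, ht⟩; rw [← ht]; rfl
  · intro h
    cases hd : l.drop n with
    | nil => simp [hd] at h
    | cons a t =>
      rw [hd] at h; simp at h; subst h
      exact ⟨t, rfl⟩

-- if position i holds a p-character then findIdx p is at most i
lemma pv_findIdx_le (p : Char → Bool) (xs : List Char) (i : Nat) (h : i < xs.length)
    (hp : p xs[i] = true) : List.findIdx p xs ≤ i := by
  by_contra hlt
  rw [Nat.not_le] at hlt
  have hf := List.not_of_lt_findIdx (p := p) (xs := xs) hlt
  exact absurd (hp.symm.trans hf) (by simp)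

-- facts about Chars.find for a single present character
lemma pv_find_mem (c : Char) (cs : List Char) (h : c ∈ cs) :
    0 ≤ PySem.Chars.find cs [c] ∧ (PySem.Chars.find cs [c]).toNat < cs.length ∧
      cs[(PySem.Chars.find cs [c]).toNat]? = some c ∧
      ∀ i < (PySem.Chars.find cs [c]).toNat, cs[i]? ≠ some c := by
  have h0 : 0 ≤ PySem.Chars.find cs [c] :=
    (PySem.Chars.find_nonneg_iff cs [c]).2 ((List.singleton_infix_iff c cs).2 h)
  obtain ⟨hpre, hmin⟩ := PySem.Chars.find_spec h0
  rw [pv_singleton_prefix_drop] at hpre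
  refine ⟨h0, (List.getElem?_eq_some_iff.1 hpre).1, hpre, fun i hi => ?_⟩
  have := hmin i hi
  rw [pv_singleton_prefix_drop] at this
  exact this

-- N string = first special index (findIdx returns length when none matches)
def pvN (string : String) : Nat := List.findIdx pvIsSpec string.toList

-- ===== B-side characterisation =====
lemma pv_alt_loop (string : String) (l : List Char) (k : Int) :
    pvAltLoop string (PySem.List.enumerate l k) =
      if List.findIdx pvIsSpec l < l.length then k + List.findIdx pvIsSpec l
      else PySem.Str.len string := by
  induction l generalizing k with
  | nil => simp [PySem.List.enumerate_nil, pvAltLoop]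
  | cons c r ih =>
    rw [PySem.List.enumerate_cons]
    simp only [pvAltLoop, pv_isIn_spec]
    rcases hc : pvIsSpec c with _ | _
    · rw [if_neg (by simp), ih (k + 1), List.findIdx_cons, hc]
      simp only [cond_false, List.length_cons]
      by_cases hlt : List.findIdx pvIsSpec r < r.length
      · rw [if_pos hlt, if_pos (by omega)]
        push_cast; ring
      · rw [if_neg hlt, if_neg (by omega)]
    · rw [if_pos rfl, List.findIdx_cons, hc]
      simp only [cond_true, List.length_cons]
      rw [if_pos (by omega)]
      simp

lemma pv_alt_eq (string : String) :
    determine_next_spec_char_alt string = (pvN string : Int) := by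
  rw [determine_next_spec_char_alt, pv_alt_loop, pvN]
  by_cases h : List.findIdx pvIsSpec string.toList < string.toList.length
  · rw [if_pos h]; ring
  · rw [if_neg h, PySem.Str.len_eq]
    have hle := List.findIdx_le_length (p := pvIsSpec) (xs := string.toList)
    omega

-- ===== A-side: the fold steps =====
def pvStepA (string : String) (loc_out : Int) (char : String) : Int :=
  if PySem.Str.isIn char string then
    if PySem.Str.find string char < loc_out then PySem.Str.find string char else loc_out
  else loc_out

lemma pv_a_eq_steps (string : String) :
    determine_next_spec_char string =
      pvStepA string (pvStepA string (pvStepA string (PySem.Str.len string) "+") "*") "." := rfl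

lemma pv_step_le (string : String) (out : Int) (char : String) :
    pvStepA string out char ≤ out := by
  unfold pvStepA; split_ifs <;> omega

-- when the single character c occurs in the string, the step result is ≤ its find
lemma pv_step_le_find (string : String) (out : Int) (char : String) (c : Char)
    (hch : char.toList = [c]) (h : c ∈ string.toList) :
    pvStepA string out char ≤ PySem.Chars.find string.toList [c] := by
  unfold pvStepA
  have hin : PySem.Str.isIn char string = true := by
    rw [PySem.Str.isIn_iff_infix, hch]
    exact (List.singleton_infix_iff c string.toList).2 h
  have hf : PySem.Str.find string char = PySem.Chars.find string.toList [c] := by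
    rw [PySem.Str.find_eq, hch]
  rw [if_pos hin, hf]
  split_ifs <;> omega

-- a step never goes below the first special index
lemma pv_step_ge (string : String) (out : Int) (char : String) (c : Char)
    (hch : char.toList = [c]) (hc : pvIsSpec c = true)
    (hout : (pvN string : Int) ≤ out) :
    (pvN string : Int) ≤ pvStepA string out char := by
  unfold pvStepA
  split_ifs with hin hlt
  · -- the find result points at a special character, so it is ≥ pvN
    have hmem : c ∈ string.toList := by
      rw [PySem.Str.isIn_iff_infix, hch] at hin
      exact (List.singleton_infix_iff c string.toList).1 hin
    obtain ⟨h0, hlen, hget, -⟩ := pv_find_mem c string.toList hmem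
    have hsp : pvIsSpec string.toList[(PySem.Chars.find string.toList [c]).toNat] = true := by
      have heq : string.toList[(PySem.Chars.find string.toList [c]).toNat] = c :=
        (List.getElem?_eq_some_iff.1 hget).2
      rw [heq]; exact hc
    have hNle := pv_findIdx_le pvIsSpec string.toList _ hlen hsp
    have hf : PySem.Str.find string char = PySem.Chars.find string.toList [c] := by
      rw [PySem.Str.find_eq, hch]
    rw [hf]
    unfold pvN
    omega
  · exact hout
  · exact hout

lemma pv_a_eq (string : String) :
    determine_next_spec_char string = (pvN string : Int) := by
  rw [pv_a_eq_steps]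
  have hplus : ("+" : String).toList = ['+'] := by decide
  have hstar : ("*" : String).toList = ['*'] := by decide
  have hdot  : ("." : String).toList = ['.'] := by decide
  have hNlen : pvN string ≤ string.toList.length := List.findIdx_le_length
  have hlen : PySem.Str.len string = (string.toList.length : Int) := PySem.Str.len_eq string
  -- lower bound: every step stays ≥ pvN
  have hge : (pvN string : Int) ≤
      pvStepA string (pvStepA string (pvStepA string (PySem.Str.len string) "+") "*") "." := by
    apply pv_step_ge string _ "." '.' hdot (by decide)
    apply pv_step_ge string _ "*" '*' hstar (by decide)
    apply pv_step_ge string _ "+" '+' hplus (by decide)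
    rw [hlen]; exact_mod_cast hNlen
  -- upper bound
  have hle : pvStepA string (pvStepA string (pvStepA string (PySem.Str.len string) "+") "*") "." ≤
      (pvN string : Int) := by
    by_cases hfound : pvN string < string.toList.length
    · -- the character at pvN is special, and the step for that character caps the fold
      have hsp : pvIsSpec string.toList[pvN string] = true := List.findIdx_getElem (w := hfound)
      have hmem : string.toList[pvN string] ∈ string.toList := List.getElem_mem hfound
      have key : ∀ c : Char, string.toList[pvN string] = c →
          PySem.Chars.find string.toList [c] ≤ (pvN string : Int) := by
        intro c hcEq
        have hcm : c ∈ string.toList := hcEq ▸ hmem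
        obtain ⟨h0, -, -, hminA⟩ := pv_find_mem c string.toList hcm
        by_contra hgt
        rw [Int.not_le] at hgt
        exact hminA (pvN string) (by omega) (by rw [List.getElem?_eq_getElem hfound, hcEq])
      rcases (by simpa [pvIsSpec, or_assoc] using hsp :
          string.toList[pvN string] = '+' ∨ string.toList[pvN string] = '*' ∨
            string.toList[pvN string] = '.') with h | h | h
      · have h1 := pv_step_le_find string (PySem.Str.len string) "+" '+' hplus (h ▸ hmem)
        have h2 := pv_step_le string (pvStepA string (PySem.Str.len string) "+") "*"
        have h3 := pv_step_le string
          (pvStepA string (pvStepA string (PySem.Str.len string) "+") "*") "."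
        have hk := key '+' h
        omega
      · have h2 := pv_step_le_find string (pvStepA string (PySem.Str.len string) "+") "*" '*'
          hstar (h ▸ hmem)
        have h3 := pv_step_le string
          (pvStepA string (pvStepA string (PySem.Str.len string) "+") "*") "."
        have hk := key '*' h
        omega
      · have h3 := pv_step_le_find string
          (pvStepA string (pvStepA string (PySem.Str.len string) "+") "*") "." '.'
          hdot (h ▸ hmem)
        have hk := key '.' h
        omega
    · -- no special character: the starting length flows through all three steps
      have hN : pvN string = string.toList.length := by omega
      have h1 := pv_step_le string (PySem.Str.len string) "+"
      have h2 := pv_step_le string (pvStepA string (PySem.Str.len string) "+") "*"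
      have h3 := pv_step_le string
        (pvStepA string (pvStepA string (PySem.Str.len string) "+") "*") "."
      rw [hN, ← hlen]
      omega
  omega

-- ===== VERDICT (by name: the statement is the Claim_ definition above) =====
theorem determine_next_spec_char_spec : Claim_equal_determine_next_spec_char := by
  intro string _
  unfold Spec_determine_next_spec_char
  rw [pv_a_eq, pv_alt_eq]
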